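-- pv_equiv track=rewrite | github.com/iitb-research-code/complete-ocr | src/table_cellwise_detection.py | get_merged_cell
-- ===== SOURCE A (Python) =====
-- def get_merged_cell(final_cells):
--     if len(final_cells) == 1:
--         return final_cells[0]
--     x1 = [c[0] for c in final_cells]
--     y1 = [c[1] for c in final_cells]
--     x2 = [c[2] for c in final_cells]
--     y2 = [c[3] for c in final_cells]
--     cell = [min(x1), min(y1), max(x2), max(y2)]
--     return cell
-- ===== SOURCE B (Python) =====
-- def get_merged_cell(final_cells):
--     if len(final_cells) == 1:
--         return final_cells[0]
--     first = final_cells[0]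
--     minx, miny, maxx, maxy = first[0], first[1], first[2], first[3]
--     for c in final_cells[1:]:
--         if c[0] < minx:
--             minx = c[0]
--         if c[1] < miny:
--             miny = c[1]
--         if maxx < c[2]:
--             maxx = c[2]
--         if maxy < c[3]:
--             maxy = c[3]
--     return [minx, miny, maxx, maxy]
-- ===== Notes on version B (the rewrite author's own statement) =====
-- stated objective: alternative
-- what changed: replaced the four list-building comprehensions plus four min/max reductions by one combined pass that maintains the four running extrema
import Mathlib
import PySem

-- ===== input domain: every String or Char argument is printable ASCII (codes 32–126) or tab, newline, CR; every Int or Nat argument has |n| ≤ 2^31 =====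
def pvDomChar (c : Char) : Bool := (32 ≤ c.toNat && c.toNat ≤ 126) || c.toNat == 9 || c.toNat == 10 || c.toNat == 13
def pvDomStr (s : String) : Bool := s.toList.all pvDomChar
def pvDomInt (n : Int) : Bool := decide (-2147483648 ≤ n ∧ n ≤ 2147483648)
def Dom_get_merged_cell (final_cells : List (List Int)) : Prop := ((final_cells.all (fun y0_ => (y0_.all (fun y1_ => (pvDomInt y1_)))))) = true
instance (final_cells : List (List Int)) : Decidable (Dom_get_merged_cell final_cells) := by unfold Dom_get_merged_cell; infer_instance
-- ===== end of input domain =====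

-- B replaces A's four comprehensions + four min/max reductions by one combined pass keeping running extrema (alternative, same cost).


-- c[i] for a well-typed cell; the Pre_ guarantees the index is in range, so getD 0 is never the value used
def pvCellGet (c : List Int) (i : Int) : Int := (PySem.List.pyGet? c i).getD 0

-- ===== PORT A =====
def get_merged_cell (final_cells : List (List Int)) : List Int :=
  if final_cells.length == 1 then final_cells.headD []
  else
    let x1 := final_cells.map (fun c => pvCellGet c 0)
    let y1 := final_cells.map (fun c => pvCellGet c 1)
    let x2 := final_cells.map (fun c => pvCellGet c 2)
    let y2 := final_cells.map (fun c => pvCellGet c 3)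
    [(PySem.List.min? x1 (fun y => y)).getD 0,
     (PySem.List.min? y1 (fun y => y)).getD 0,
     (PySem.List.max? x2 (fun y => y)).getD 0,
     (PySem.List.max? y2 (fun y => y)).getD 0]

-- ===== PORT B =====
def get_merged_cell_alt (final_cells : List (List Int)) : List Int :=
  if final_cells.length == 1 then final_cells.headD []
  else
    match final_cells with
    | [] => []   -- unreachable under Pre_ (A raises on [])
    | first :: rest =>
      let s := rest.foldl
        (fun (s : Int × Int × Int × Int) c =>
          (if pvCellGet c 0 < s.1 then pvCellGet c 0 else s.1,
           if pvCellGet c 1 < s.2.1 then pvCellGet c 1 else s.2.1,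
           if s.2.2.1 < pvCellGet c 2 then pvCellGet c 2 else s.2.2.1,
           if s.2.2.2 < pvCellGet c 3 then pvCellGet c 3 else s.2.2.2))
        (pvCellGet first 0, pvCellGet first 1, pvCellGet first 2, pvCellGet first 3)
      [s.1, s.2.1, s.2.2.1, s.2.2.2]

-- ===== PRECONDITION & SPEC =====
-- Pre_ excludes exactly the inputs where A raises: the empty list (min of an empty sequence)
-- and, when more than one cell is present, any cell shorter than 4 entries (IndexError).
def Pre_get_merged_cell (final_cells : List (List Int)) : Prop :=
  final_cells ≠ [] ∧ (final_cells.length = 1 ∨ ∀ c ∈ final_cells, 4 ≤ c.length)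
instance (final_cells : List (List Int)) : Decidable (Pre_get_merged_cell final_cells) := by
  unfold Pre_get_merged_cell; infer_instance

def pvWitness_get_merged_cell : List (List Int) := [[1, 2, 5, 6], [0, 3, 4, 9]]

def Spec_get_merged_cell (final_cells : List (List Int)) (out : List Int) : Prop := out = get_merged_cell_alt final_cells
instance (final_cells : List (List Int)) (out : List Int) : Decidable (Spec_get_merged_cell final_cells out) := by unfold Spec_get_merged_cell; infer_instance

-- ===== CLAIM (what is proved, stated in full; the proofs are below) =====
def Claim_equal_get_merged_cell : Prop := ∀ (final_cells : List (List Int)), Dom_get_merged_cell final_cells → Pre_get_merged_cell final_cells → Spec_get_merged_cell final_cells (get_merged_cell final_cells)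

-- ===== LEMMAS AND PROOFS =====

-- the combined fold computes the four independent folds
theorem foldl_quad (rest : List (List Int)) (a b x y : Int) :
    rest.foldl
      (fun (s : Int × Int × Int × Int) c =>
        (if pvCellGet c 0 < s.1 then pvCellGet c 0 else s.1,
         if pvCellGet c 1 < s.2.1 then pvCellGet c 1 else s.2.1,
         if s.2.2.1 < pvCellGet c 2 then pvCellGet c 2 else s.2.2.1,
         if s.2.2.2 < pvCellGet c 3 then pvCellGet c 3 else s.2.2.2))
      (a, b, x, y)
    = (rest.foldl (fun m c => min m (pvCellGet c 0)) a,
       rest.foldl (fun m c => min m (pvCellGet c 1)) b,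
       rest.foldl (fun m c => max m (pvCellGet c 2)) x,
       rest.foldl (fun m c => max m (pvCellGet c 3)) y) := by
  induction rest generalizing a b x y with
  | nil => rfl
  | cons c t ih =>
    simp only [List.foldl_cons]
    rw [ih]
    have hmin : ∀ v m : Int, (if v < m then v else m) = min m v := by
      intro v m; rw [min_def]; split_ifs <;> omega
    have hmax : ∀ v m : Int, (if m < v then v else m) = max m v := by
      intro v m; rw [max_def]; split_ifs <;> omega
    rw [hmin, hmin, hmax, hmax]

-- ===== VERDICT =====
theorem get_merged_cell_spec : Claim_equal_get_merged_cell := by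
  intro fc _hdom hpre
  unfold Spec_get_merged_cell get_merged_cell get_merged_cell_alt
  obtain ⟨hne, _⟩ := hpre
  by_cases h1 : fc.length == 1
  · simp [h1]
  · match fc, hne with
    | first :: rest, _ =>
      simp only [h1, Bool.false_eq_true, if_false, foldl_quad, List.map_cons,
        PySem.List.min?_id_cons, PySem.List.max?_id_cons, Option.getD_some, List.foldl_map]
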